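-- pv_equiv track=rewrite | github.com/GyuReeKim/PycharmProjects | PracticeExam2/01.py | f
-- ===== SOURCE A (Python) =====
-- def f(N, card):
--     for i in range(2, N):
--         if card[i-2] > card[i-1]:
--             if card[i-1] < card[i]:
--                 return -1
--         elif card[i-2] < card[i-1]:
--             if card[i-1] > card[i]:
--                 return -1
--     return 1
-- ===== SOURCE B (Python) =====
-- def f(N, card):
--     # two staged passes build the set of up-steps and the set of down-steps;
--     # a strict peak/valley is a point in one set whose successor is in the other,
--     # detected by shifted set intersection
--     steps = range(N - 1)
--     up = {k for k in steps if card[k] < card[k + 1]}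
--     down = {k for k in steps if card[k] > card[k + 1]}
--     if up & {k - 1 for k in down} or down & {k - 1 for k in up}:
--         return -1
--     return 1
-- ===== Notes on version B (the rewrite author's own statement) =====
-- stated objective: alternative
-- what changed: B makes two staged passes building the set of up-step positions and the set of down-step positions across the first N cards, then detects a peak/valley purely by shifted set intersection (up & (down-1) or down & (up-1)), with no triple scan and no early return.
-- outside the precondition, e.g. on f(2, []): A returns 1, B raises IndexError; on f(5, [1, 3, 2]): A returns -1, B raises IndexError
import Mathlib
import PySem

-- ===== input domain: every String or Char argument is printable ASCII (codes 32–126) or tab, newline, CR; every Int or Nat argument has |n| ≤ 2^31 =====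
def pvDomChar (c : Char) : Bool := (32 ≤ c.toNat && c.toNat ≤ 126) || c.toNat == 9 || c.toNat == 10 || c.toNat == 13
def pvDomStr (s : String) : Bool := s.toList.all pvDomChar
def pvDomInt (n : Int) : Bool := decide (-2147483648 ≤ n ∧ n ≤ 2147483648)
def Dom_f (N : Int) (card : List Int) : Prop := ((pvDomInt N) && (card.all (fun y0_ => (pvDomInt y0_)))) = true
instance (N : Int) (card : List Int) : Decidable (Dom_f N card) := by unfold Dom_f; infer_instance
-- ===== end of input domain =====

-- B replaces A's triple-scan with two staged passes that build the set of up-step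
-- positions and the set of down-step positions, and detects a peak/valley by
-- shifted set intersection (objective: alternative).

-- ===== PORT A =====
-- card[i] is ported as pyGetD … 0; Pre_f guarantees every accessed index is in range,
-- so the default is never consulted on admitted inputs.
def fLoopA (card : List Int) : List Int → Int
  | [] => 1
  | i :: rest =>
    if PySem.List.pyGetD card (i - 2) 0 > PySem.List.pyGetD card (i - 1) 0 then
      if PySem.List.pyGetD card (i - 1) 0 < PySem.List.pyGetD card i 0 then -1
      else fLoopA card rest
    else if PySem.List.pyGetD card (i - 2) 0 < PySem.List.pyGetD card (i - 1) 0 then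
      if PySem.List.pyGetD card (i - 1) 0 > PySem.List.pyGetD card i 0 then -1
      else fLoopA card rest
    else fLoopA card rest

def f (N : Int) (card : List Int) : Int :=
  fLoopA card (PySem.List.pyRange 2 N 1)

-- ===== PORT B =====
-- the set comprehensions over range(N-1) produce distinct elements, so the filtered
-- ranges below ARE those sets; 'up & {k-1 for k in down}' nonempty is ported as
-- 'up.any (member of the shifted down set)'
def f_alt (N : Int) (card : List Int) : Int :=
  let steps := PySem.List.pyRange 0 (N - 1) 1
  let up := steps.filter (fun k =>
    decide (PySem.List.pyGetD card k 0 < PySem.List.pyGetD card (k + 1) 0))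
  let down := steps.filter (fun k =>
    decide (PySem.List.pyGetD card k 0 > PySem.List.pyGetD card (k + 1) 0))
  if up.any (fun k => (down.map (fun j => j - 1)).contains k)
     || down.any (fun k => (up.map (fun j => j - 1)).contains k) then -1
  else 1

-- ===== PRECONDITION & SPEC =====
-- Pre_ excludes N > len(card) (beyond the trivial N ≤ 1): there B raises IndexError
-- (its set-building passes touch card[0..N-2] unconditionally), while A raises too
-- unless an early reversal (or N = 2's empty loop) returns first.
def Pre_f (N : Int) (card : List Int) : Prop := N ≤ (card.length : Int) ∨ N ≤ 1
instance (N : Int) (card : List Int) : Decidable (Pre_f N card) := by unfold Pre_f; infer_instance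
def pvWitness_f : Int × List Int := (4, [1, 2, 5, 3])

def Spec_f (N : Int) (card : List Int) (out : Int) : Prop := out = f_alt N card
instance (N : Int) (card : List Int) (out : Int) : Decidable (Spec_f N card out) := by unfold Spec_f; infer_instance

-- ===== CLAIM (what is proved, stated in full; the proofs are below) =====
def Claim_equal_f : Prop := ∀ (N : Int) (card : List Int), Dom_f N card → Pre_f N card → Spec_f N card (f N card)

-- ===== LEMMAS AND PROOFS =====

-- A's triple condition at loop index i, as a Bool
def condA (card : List Int) (i : Int) : Bool :=
  (decide (PySem.List.pyGetD card (i - 2) 0 > PySem.List.pyGetD card (i - 1) 0)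
    && decide (PySem.List.pyGetD card (i - 1) 0 < PySem.List.pyGetD card i 0))
  || (decide (PySem.List.pyGetD card (i - 2) 0 < PySem.List.pyGetD card (i - 1) 0)
    && decide (PySem.List.pyGetD card (i - 1) 0 > PySem.List.pyGetD card i 0))

-- one step of A's loop: test the triple, else continue
lemma fLoopA_cons (card : List Int) (i : Int) (rest : List Int) :
    fLoopA card (i :: rest) = if condA card i then -1 else fLoopA card rest := by
  simp only [fLoopA, condA]
  by_cases h1 : PySem.List.pyGetD card (i - 2) 0 > PySem.List.pyGetD card (i - 1) 0
  · by_cases h2 : PySem.List.pyGetD card (i - 1) 0 < PySem.List.pyGetD card i 0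
    · simp [h1, h2]
    · have h5 : ¬ PySem.List.pyGetD card (i - 2) 0 < PySem.List.pyGetD card (i - 1) 0 := by
        omega
      simp [h1, h2, h5]
  · by_cases h3 : PySem.List.pyGetD card (i - 2) 0 < PySem.List.pyGetD card (i - 1) 0
    · by_cases h4 : PySem.List.pyGetD card (i - 1) 0 > PySem.List.pyGetD card i 0
      · simp [h1, h3, h4]
      · simp [h1, h3, h4]
    · simp [h1, h3]

-- A's early-return loop returns -1 iff some index in the list satisfies condA
lemma fLoopA_eq_any (card : List Int) (l : List Int) :
    fLoopA card l = if l.any (condA card) then -1 else 1 := by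
  induction l with
  | nil => rfl
  | cons i rest ih =>
    rw [fLoopA_cons, List.any_cons]
    by_cases hc : condA card i = true
    · simp [hc]
    · simp only [Bool.not_eq_true] at hc
      simp [hc, ih]

-- ===== VERDICT (by name: the statement is the Claim_ definition above) =====
theorem f_spec : Claim_equal_f := by
  intro N card _ _
  unfold Spec_f f f_alt
  rw [fLoopA_eq_any]
  congr 1
  rw [eq_iff_iff]
  simp only [List.any_eq_true, List.mem_filter, List.contains_eq_mem, List.mem_map,
    PySem.List.mem_pyRange_one, Bool.or_eq_true, decide_eq_true_eq, condA,
    Bool.and_eq_true]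
  constructor
  · rintro ⟨i, ⟨h2, hN⟩, hc⟩
    rcases hc with ⟨ha, hb⟩ | ⟨ha, hb⟩
    · -- down at i-2, up at i-1
      refine Or.inr ⟨i - 2, ⟨⟨by omega, by omega⟩, by
          simpa [show i - 2 + 1 = i - 1 from by omega] using ha⟩,
        ⟨i - 1, ⟨⟨by omega, by omega⟩, ?_⟩, by omega⟩⟩
      simpa [show i - 1 + 1 = i by omega] using hb
    · refine Or.inl ⟨i - 2, ⟨⟨by omega, by omega⟩, by
          simpa [show i - 2 + 1 = i - 1 from by omega] using ha⟩,
        ⟨i - 1, ⟨⟨by omega, by omega⟩, ?_⟩, by omega⟩⟩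
      simpa [show i - 1 + 1 = i by omega] using hb
  · rintro (⟨k, ⟨⟨hk0, hk1⟩, hu⟩, j, ⟨⟨hj0, hj1⟩, hd⟩, hjk⟩ |
            ⟨k, ⟨⟨hk0, hk1⟩, hd⟩, j, ⟨⟨hj0, hj1⟩, hu⟩, hjk⟩)
    · -- up at k, down at j = k+1  → valley/peak at i = k+2 (A's second branch? no: a<b, b>c)
      refine ⟨k + 2, ⟨by omega, by omega⟩, Or.inr ⟨?_, ?_⟩⟩
      · simpa [show k + 2 - 2 = k by omega, show k + 2 - 1 = k + 1 by omega] using hu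
      · have : j = k + 1 := by omega
        subst this
        simpa [show k + 2 - 1 = k + 1 by omega, show k + 1 + 1 = k + 2 by omega] using hd
    · refine ⟨k + 2, ⟨by omega, by omega⟩, Or.inl ⟨?_, ?_⟩⟩
      · simpa [show k + 2 - 2 = k by omega, show k + 2 - 1 = k + 1 by omega] using hd
      · have : j = k + 1 := by omega
        subst this
        simpa [show k + 2 - 1 = k + 1 by omega, show k + 1 + 1 = k + 2 by omega] using hu
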